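-- pv_equiv track=rewrite | github.com/Tbread/AlgorithmPrac | 백준/2178.py | convert_edge
-- ===== SOURCE A (Python) =====
-- def convert_edge(arr, sx, sy, check, x, y, edges):
--     coords = [[-1, 0], [1, 0], [0, -1], [0, 1]]
--     for coord in coords:
--         if (0 <= sy + coord[0] < y) and (0 <= sx + coord[1] < x):
--             if [[sy + coord[0]], [sx + coord[1]]] in check:
--                 continue
--             check.append([[sy + coord[0]], [sx + coord[1]]])
--             if arr[sy + coord[0]][sx + coord[1]] == 0:
--                 continue
--             if [sy * x + sx, ((sy + coord[0]) * x) + sx + coord[1]] in edges or [((sy + coord[0]) * x) + sx + coord[1],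
--                                                                                  sy * x + sx] in edges:
--                 continue
--
--             edges.append([sy * x + sx, ((sy + coord[0]) * x) + sx + coord[1]])
--             arr, check, edges = convert_edge(arr, sx + coord[1], sy + coord[0], check, x, y, edges)
--     return arr, check, edges
-- ===== SOURCE B (Python) =====
-- def convert_edge(arr, sx, sy, check, x, y, edges):
--     coords = [(-1, 0), (1, 0), (0, -1), (0, 1)]
--     stack = [(sx, sy, coords)]
--     while stack:
--         cx, cy, rest = stack[-1]
--         if not rest:
--             stack.pop()
--             continue
--         (dy, dx), rest = rest[0], rest[1:]
--         stack[-1] = (cx, cy, rest)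
--         ny, nx = cy + dy, cx + dx
--         if not (0 <= ny < y and 0 <= nx < x):
--             continue
--         if [[ny], [nx]] in check:
--             continue
--         check.append([[ny], [nx]])
--         if arr[ny][nx] == 0:
--             continue
--         a, b = cy * x + cx, ny * x + nx
--         if [a, b] in edges or [b, a] in edges:
--             continue
--         edges.append([a, b])
--         stack.append((nx, ny, coords))
--     return arr, check, edges
-- ===== Notes on version B (the rewrite author's own statement) =====
-- stated objective: alternative
-- what changed: Replaces A's recursive DFS over the grid with an iterative DFS driven by an explicit stack of (cx, cy, remaining-offsets) frames that resumes a parent's remaining directions only after the pushed child subtree completes, producing the identical pre-order sequence of check/edge appends.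
import Mathlib
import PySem

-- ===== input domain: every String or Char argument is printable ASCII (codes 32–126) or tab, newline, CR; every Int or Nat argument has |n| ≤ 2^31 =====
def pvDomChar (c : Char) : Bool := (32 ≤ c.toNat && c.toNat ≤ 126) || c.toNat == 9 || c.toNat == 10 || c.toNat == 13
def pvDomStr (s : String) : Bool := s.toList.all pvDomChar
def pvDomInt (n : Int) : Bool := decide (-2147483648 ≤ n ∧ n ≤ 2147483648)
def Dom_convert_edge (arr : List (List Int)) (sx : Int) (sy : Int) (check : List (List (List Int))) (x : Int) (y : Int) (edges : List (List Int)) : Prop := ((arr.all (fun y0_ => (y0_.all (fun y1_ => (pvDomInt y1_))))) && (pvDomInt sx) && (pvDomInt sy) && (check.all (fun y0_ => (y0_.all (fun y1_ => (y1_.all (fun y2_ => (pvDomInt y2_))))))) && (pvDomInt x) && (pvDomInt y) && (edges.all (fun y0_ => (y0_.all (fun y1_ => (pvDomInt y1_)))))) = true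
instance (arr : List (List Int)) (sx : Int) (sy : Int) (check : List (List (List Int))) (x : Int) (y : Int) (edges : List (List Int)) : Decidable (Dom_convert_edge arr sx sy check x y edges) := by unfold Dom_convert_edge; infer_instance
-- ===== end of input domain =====

-- B re-implements A's recursive grid DFS as an iterative explicit-stack loop (alternative decomposition);
-- equivalence is about the RETURN value: both Pythons also append to `check`/`edges` in place (the same appends in the same order).

-- ===== PORT A =====
-- the four neighbour offsets, as in both Pythons
def pvCoords : List (Int × Int) := [(-1, 0), (1, 0), (0, -1), (0, 1)]

mutual
-- fuel only makes the recursion total; convert_edge supplies enough fuel (one unit per nesting level,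
-- and each level first adds a fresh in-bounds cell to `check`, so x*y+1 levels can never be exceeded)
def pvGoA (arr : List (List Int)) (sx sy : Int) (check : List (List (List Int))) (x y : Int) (edges : List (List Int)) (f : Nat) : List (List Int) × List (List (List Int)) × List (List Int) :=
  match f with
  | 0 => (arr, check, edges)
  | f' + 1 => pvLoopA pvCoords arr sx sy check x y edges f'
termination_by (f, 0)

-- the `for coord in coords` loop of A, with its continue-chain as nested ifs
def pvLoopA (coords : List (Int × Int)) (arr : List (List Int)) (sx sy : Int) (check : List (List (List Int))) (x y : Int) (edges : List (List Int)) (f : Nat) : List (List Int) × List (List (List Int)) × List (List Int) :=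
  match coords with
  | [] => (arr, check, edges)
  | coord :: rest =>
    if (0 ≤ sy + coord.1 ∧ sy + coord.1 < y) ∧ (0 ≤ sx + coord.2 ∧ sx + coord.2 < x) then
      if [[sy + coord.1], [sx + coord.2]] ∈ check then
        pvLoopA rest arr sx sy check x y edges f
      else
        -- arr[sy+coord[0]][sx+coord[1]]: in range under Pre_ (the .getD defaults are never used there)
        if (PySem.List.pyGet? ((PySem.List.pyGet? arr (sy + coord.1)).getD []) (sx + coord.2)).getD 0 = 0 then
          pvLoopA rest arr sx sy (check ++ [[[sy + coord.1], [sx + coord.2]]]) x y edges f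
        else if [sy * x + sx, (sy + coord.1) * x + sx + coord.2] ∈ edges ∨ [(sy + coord.1) * x + sx + coord.2, sy * x + sx] ∈ edges then
          pvLoopA rest arr sx sy (check ++ [[[sy + coord.1], [sx + coord.2]]]) x y edges f
        else
          let r := pvGoA arr (sx + coord.2) (sy + coord.1) (check ++ [[[sy + coord.1], [sx + coord.2]]]) x y (edges ++ [[sy * x + sx, (sy + coord.1) * x + sx + coord.2]]) f
          pvLoopA rest r.1 sx sy r.2.1 x y r.2.2 f
    else
      pvLoopA rest arr sx sy check x y edges f
termination_by (f, coords.length + 1)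
end

def convert_edge (arr : List (List Int)) (sx : Int) (sy : Int) (check : List (List (List Int))) (x : Int) (y : Int) (edges : List (List Int)) : List (List Int) × List (List (List Int)) × List (List Int) :=
  pvGoA arr sx sy check x y edges (x.toNat * y.toNat + 1)

-- ===== PORT B =====
-- termination measure helper for the stack loop: number of in-bounds cells not yet in `check`
noncomputable def pvFree (x y : Int) (check : List (List (List Int))) : Nat :=
  ((Finset.Ico (0 : Int) y ×ˢ Finset.Ico (0 : Int) x).filter (fun p => [[p.1], [p.2]] ∉ check)).card

theorem pvFree_append_lt (x y ny nx : Int) (check : List (List (List Int)))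
    (h1 : 0 ≤ ny) (h2 : ny < y) (h3 : 0 ≤ nx) (h4 : nx < x)
    (h5 : [[ny], [nx]] ∉ check) :
    pvFree x y (check ++ [[[ny], [nx]]]) < pvFree x y check := by
  apply Finset.card_lt_card
  rw [Finset.ssubset_iff_of_subset]
  · refine ⟨(ny, nx), ?_, ?_⟩
    · simp only [Finset.mem_filter, Finset.mem_product, Finset.mem_Ico]
      exact ⟨⟨⟨h1, h2⟩, h3, h4⟩, h5⟩
    · simp [List.mem_append]
  · intro p hp
    simp only [Finset.mem_filter, List.mem_append] at *
    tauto

-- B: the explicit stack of frames (cx, cy, remaining offsets)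
def pvGoB (arr : List (List Int)) (x y : Int) (stack : List (Int × Int × List (Int × Int))) (check : List (List (List Int))) (edges : List (List Int)) : List (List (List Int)) × List (List Int) :=
  match stack with
  | [] => (check, edges)
  | (cx, cy, rest) :: stk =>
    match rest with
    | [] => pvGoB arr x y stk check edges
    | (dy, dx) :: rest' =>
      if hb : (0 ≤ cy + dy ∧ cy + dy < y) ∧ (0 ≤ cx + dx ∧ cx + dx < x) then
        if hm : [[cy + dy], [cx + dx]] ∈ check then
          pvGoB arr x y ((cx, cy, rest') :: stk) check edges
        else
          if (PySem.List.pyGet? ((PySem.List.pyGet? arr (cy + dy)).getD []) (cx + dx)).getD 0 = 0 then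
            pvGoB arr x y ((cx, cy, rest') :: stk) (check ++ [[[cy + dy], [cx + dx]]]) edges
          else if [cy * x + cx, (cy + dy) * x + cx + dx] ∈ edges ∨ [(cy + dy) * x + cx + dx, cy * x + cx] ∈ edges then
            pvGoB arr x y ((cx, cy, rest') :: stk) (check ++ [[[cy + dy], [cx + dx]]]) edges
          else
            pvGoB arr x y ((cx + dx, cy + dy, pvCoords) :: (cx, cy, rest') :: stk) (check ++ [[[cy + dy], [cx + dx]]]) (edges ++ [[cy * x + cx, (cy + dy) * x + cx + dx]])
      else
        pvGoB arr x y ((cx, cy, rest') :: stk) check edges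
termination_by (pvFree x y check, (stack.map (fun fr => fr.2.2.length + 1)).sum)
decreasing_by
  all_goals first
    | exact Prod.Lex.left _ _ (pvFree_append_lt x y (cy + dy) (cx + dx) check hb.1.1 hb.1.2 hb.2.1 hb.2.2 hm)
    | (apply Prod.Lex.right; simp; try omega)

def convert_edge_alt (arr : List (List Int)) (sx : Int) (sy : Int) (check : List (List (List Int))) (x : Int) (y : Int) (edges : List (List Int)) : List (List Int) × List (List (List Int)) × List (List Int) :=
  let r := pvGoB arr x y [(sx, sy, pvCoords)] check edges
  (arr, r.1, r.2)

-- ===== PRECONDITION & SPEC =====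
-- Pre_ excludes inputs on which the DFS can step onto a cell missing from `arr` (Python raises IndexError);
-- it keeps inputs where the grid covers the stated x×y bounds, and also all inputs whose start cell has no
-- in-bounds neighbour (then A touches nothing and returns at once).  It is slightly narrower than A's exact
-- domain: with a ragged/short `arr`, A can still return when `check` already blocks every reachable access.
def Pre_convert_edge (arr : List (List Int)) (sx : Int) (sy : Int) (check : List (List (List Int))) (x : Int) (y : Int) (edges : List (List Int)) : Prop :=
  (y ≤ (arr.length : Int) ∧ ∀ row ∈ arr, x ≤ (row.length : Int)) ∨
  ¬ ((0 ≤ sy - 1 ∧ sy - 1 < y ∧ 0 ≤ sx ∧ sx < x) ∨ (0 ≤ sy + 1 ∧ sy + 1 < y ∧ 0 ≤ sx ∧ sx < x) ∨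
     (0 ≤ sy ∧ sy < y ∧ ((0 ≤ sx - 1 ∧ sx - 1 < x) ∨ (0 ≤ sx + 1 ∧ sx + 1 < x))))
instance (arr : List (List Int)) (sx : Int) (sy : Int) (check : List (List (List Int))) (x : Int) (y : Int) (edges : List (List Int)) : Decidable (Pre_convert_edge arr sx sy check x y edges) := by unfold Pre_convert_edge; infer_instance

def pvWitness_convert_edge : List (List Int) × Int × Int × List (List (List Int)) × Int × Int × List (List Int) :=
  ([[1, 1], [1, 0]], 0, 0, [], 2, 2, [])

def Spec_convert_edge (arr : List (List Int)) (sx : Int) (sy : Int) (check : List (List (List Int))) (x : Int) (y : Int) (edges : List (List Int)) (out : List (List Int) × List (List (List Int)) × List (List Int)) : Prop := out = convert_edge_alt arr sx sy check x y edges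
instance (arr : List (List Int)) (sx : Int) (sy : Int) (check : List (List (List Int))) (x : Int) (y : Int) (edges : List (List Int)) (out : List (List Int) × List (List (List Int)) × List (List Int)) : Decidable (Spec_convert_edge arr sx sy check x y edges out) := by unfold Spec_convert_edge; infer_instance

-- ===== CLAIM (what is proved, stated in full; the proofs are below) =====
def Claim_equal_convert_edge : Prop := ∀ (arr : List (List Int)) (sx : Int) (sy : Int) (check : List (List (List Int))) (x : Int) (y : Int) (edges : List (List Int)), Dom_convert_edge arr sx sy check x y edges → Pre_convert_edge arr sx sy check x y edges → Spec_convert_edge arr sx sy check x y edges (convert_edge arr sx sy check x y edges)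

-- ===== LEMMAS AND PROOFS =====

theorem pvFree_append_le (x y : Int) (check t : List (List (List Int))) :
    pvFree x y (check ++ t) ≤ pvFree x y check := by
  apply Finset.card_le_card
  intro p hp
  simp only [Finset.mem_filter, List.mem_append] at *
  tauto

-- the free-cell count is below the fuel convert_edge supplies
theorem pvFree_lt_fuel (x y : Int) (check : List (List (List Int))) :
    pvFree x y check < x.toNat * y.toNat + 1 := by
  have h := Finset.card_filter_le (Finset.Ico (0 : Int) y ×ˢ Finset.Ico (0 : Int) x) (fun p => [[p.1], [p.2]] ∉ check)
  have h2 : (Finset.Ico (0 : Int) y ×ˢ Finset.Ico (0 : Int) x).card = y.toNat * x.toNat := by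
    rw [Finset.card_product, Int.card_Ico, Int.card_Ico]
    simp
  have h3 : y.toNat * x.toNat = x.toNat * y.toNat := Nat.mul_comm _ _
  unfold pvFree
  omega

-- one fuel level of A's loop returns arr unchanged and only appends to check
theorem pv_loop_step (F : Nat)
    (hgo : ∀ arr sx sy check x y edges, (pvGoA arr sx sy check x y edges F).1 = arr ∧ ∃ t, (pvGoA arr sx sy check x y edges F).2.1 = check ++ t) :
    ∀ coords arr sx sy check x y edges, (pvLoopA coords arr sx sy check x y edges F).1 = arr ∧ ∃ t, (pvLoopA coords arr sx sy check x y edges F).2.1 = check ++ t := by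
  intro coords
  induction coords with
  | nil => intro arr sx sy check x y edges; exact ⟨by simp [pvLoopA], [], by simp [pvLoopA]⟩
  | cons coord rest IH =>
    intro arr sx sy check x y edges
    simp only [pvLoopA]
    split_ifs with hb hm hv he
    · exact IH arr sx sy check x y edges
    · obtain ⟨h1, t, ht⟩ := IH arr sx sy (check ++ [[[sy + coord.1], [sx + coord.2]]]) x y edges
      exact ⟨h1, [[[sy + coord.1], [sx + coord.2]]] ++ t, by rw [ht, List.append_assoc]⟩
    · obtain ⟨h1, t, ht⟩ := IH arr sx sy (check ++ [[[sy + coord.1], [sx + coord.2]]]) x y edges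
      exact ⟨h1, [[[sy + coord.1], [sx + coord.2]]] ++ t, by rw [ht, List.append_assoc]⟩
    · obtain ⟨g1, t0, ht0⟩ := hgo arr (sx + coord.2) (sy + coord.1) (check ++ [[[sy + coord.1], [sx + coord.2]]]) x y (edges ++ [[sy * x + sx, (sy + coord.1) * x + sx + coord.2]])
      obtain ⟨h1, t, ht⟩ := IH _ sx sy _ x y ((pvGoA arr (sx + coord.2) (sy + coord.1) (check ++ [[[sy + coord.1], [sx + coord.2]]]) x y (edges ++ [[sy * x + sx, (sy + coord.1) * x + sx + coord.2]]) F).2.2)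
      refine ⟨by rw [h1, g1], [[[sy + coord.1], [sx + coord.2]]] ++ t0 ++ t, ?_⟩
      rw [ht, ht0]
      simp [List.append_assoc]
    · exact IH arr sx sy check x y edges

-- arr is returned unchanged and check only grows, for both A-side functions
theorem pv_extendA (f : Nat) :
    (∀ arr sx sy check x y edges, (pvGoA arr sx sy check x y edges f).1 = arr ∧ ∃ t, (pvGoA arr sx sy check x y edges f).2.1 = check ++ t) ∧
    (∀ coords arr sx sy check x y edges, (pvLoopA coords arr sx sy check x y edges f).1 = arr ∧ ∃ t, (pvLoopA coords arr sx sy check x y edges f).2.1 = check ++ t) := by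
  induction f with
  | zero =>
    have hgo : ∀ arr sx sy check x y edges, (pvGoA arr sx sy check x y edges 0).1 = arr ∧ ∃ t, (pvGoA arr sx sy check x y edges 0).2.1 = check ++ t := by
      intro arr sx sy check x y edges; exact ⟨by simp [pvGoA], [], by simp [pvGoA]⟩
    exact ⟨hgo, pv_loop_step 0 hgo⟩
  | succ f' IHf =>
    have hgo : ∀ arr sx sy check x y edges, (pvGoA arr sx sy check x y edges (f' + 1)).1 = arr ∧ ∃ t, (pvGoA arr sx sy check x y edges (f' + 1)).2.1 = check ++ t := by
      intro arr sx sy check x y edges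
      simp only [pvGoA]
      exact IHf.2 pvCoords arr sx sy check x y edges
    exact ⟨hgo, pv_loop_step (f' + 1) hgo⟩

-- key simulation lemma: popping one frame of B's stack computes exactly A's loop over that frame's
-- remaining offsets (with any sufficient fuel), then continues with the rest of the stack
theorem pv_bridge (k : Nat) : ∀ (arr : List (List Int)) (x y : Int) (rest : List (Int × Int)) (cx cy : Int),
    ∀ (check : List (List (List Int))) (stk : List (Int × Int × List (Int × Int))) (edges : List (List Int)) (f : Nat),
      pvFree x y check ≤ k → pvFree x y check ≤ f →
      pvGoB arr x y ((cx, cy, rest) :: stk) check edges =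
        pvGoB arr x y stk (pvLoopA rest arr cx cy check x y edges f).2.1 (pvLoopA rest arr cx cy check x y edges f).2.2 := by
  induction k using Nat.strong_induction_on with
  | _ k IHk =>
  intro arr x y rest cx cy
  induction rest with
  | nil =>
    intro check stk edges f hk hf
    simp [pvGoB, pvLoopA]
  | cons hd rest' IH =>
    obtain ⟨dy, dx⟩ := hd
    intro check stk edges f hk hf
    simp only [pvGoB, pvLoopA]
    split_ifs with hb hm hv he
    · -- neighbour already in check: both skip
      exact IH check stk edges f hk hf
    · -- fresh cell, grid value 0
      exact IH _ stk edges f (le_trans (pvFree_append_le x y check _) hk) (le_trans (pvFree_append_le x y check _) hf)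
    · -- fresh cell, edge already present
      exact IH _ stk edges f (le_trans (pvFree_append_le x y check _) hk) (le_trans (pvFree_append_le x y check _) hf)
    · -- accepted edge: B pushes a frame, A recurses
      have hlt : pvFree x y (check ++ [[[cy + dy], [cx + dx]]]) < pvFree x y check :=
        pvFree_append_lt x y (cy + dy) (cx + dx) check hb.1.1 hb.1.2 hb.2.1 hb.2.2 hm
      obtain ⟨f', rfl⟩ : ∃ f', f = f' + 1 := ⟨f - 1, by omega⟩
      rw [IHk (pvFree x y (check ++ [[[cy + dy], [cx + dx]]])) (by omega) arr x y pvCoords (cx + dx) (cy + dy) _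
          ((cx, cy, rest') :: stk) _ f' le_rfl (by omega)]
      obtain ⟨ha, t, ht⟩ := (pv_extendA f').2 pvCoords arr (cx + dx) (cy + dy) (check ++ [[[cy + dy], [cx + dx]]]) x y
        (edges ++ [[cy * x + cx, (cy + dy) * x + cx + dx]])
      have hC2 : pvFree x y (pvLoopA pvCoords arr (cx + dx) (cy + dy) (check ++ [[[cy + dy], [cx + dx]]]) x y (edges ++ [[cy * x + cx, (cy + dy) * x + cx + dx]]) f').2.1 ≤ pvFree x y (check ++ [[[cy + dy], [cx + dx]]]) := by
        rw [ht]
        exact pvFree_append_le x y (check ++ [[[cy + dy], [cx + dx]]]) t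
      rw [IH _ stk _ (f' + 1) (by omega) (by omega)]
      simp only [pvGoA]
      rw [ha]
    · -- neighbour out of bounds: both skip
      exact IH check stk edges f hk hf

-- the two ports agree on every input (Pre_ is only needed for faithfulness to the Pythons)
theorem pv_total_eq : ∀ (arr : List (List Int)) (sx : Int) (sy : Int) (check : List (List (List Int))) (x : Int) (y : Int) (edges : List (List Int)),
    convert_edge arr sx sy check x y edges = convert_edge_alt arr sx sy check x y edges := by
  intro arr sx sy check x y edges
  unfold convert_edge convert_edge_alt
  have hb := pv_bridge (pvFree x y check) arr x y pvCoords sx sy check [] edges (x.toNat * y.toNat) le_rfl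
    (by have := pvFree_lt_fuel x y check; omega)
  simp only [pvGoB] at hb
  obtain ⟨ha, t, ht⟩ := (pv_extendA (x.toNat * y.toNat)).2 pvCoords arr sx sy check x y edges
  simp only [pvGoA]
  rw [hb]
  exact Prod.ext ha (by simp)

-- ===== VERDICT (by name: the statement is the Claim_ definition above) =====
theorem convert_edge_spec : Claim_equal_convert_edge := by
  intro arr sx sy check x y edges _ _
  unfold Spec_convert_edge
  exact pv_total_eq arr sx sy check x y edges
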